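-- pv_equiv track=rewrite | github.com/bashar-elnashef/multi_task_classification_utkfaces | utils/util.py | categorize_age
-- ===== SOURCE A (Python) =====
-- def categorize_age(age):
--     """Create a function to categorize an age."""
--     # Define the labels and corresponding age ranges
--     new_ranges = ['1-3', '4-7', '8-12', '13-19', '20-35', '36-55', '56-75', '76-116']
--     # new_label_classes = ['Baby', 'Child', 'Preteen', 'Teenager', 'Young Adult', 'Adult', 'Senior', 'Elderly']
--     new_labels = [0, 1, 2, 3, 4, 5, 6, 7]
--
--     for i, age_range in enumerate(new_ranges):
--         start, end = map(int, age_range.split('-'))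
--         if start <= age <= end:
--             return new_labels[i]
--     return None  # Return None for ages that don't fall into any range
-- ===== SOURCE B (Python) =====
-- import bisect
--
-- # Same mapping via parallel bound arrays and binary search; labels are the indices.
-- _STARTS = [1, 4, 8, 13, 20, 36, 56, 76]
-- _ENDS = [3, 7, 12, 19, 35, 55, 75, 116]
--
--
-- def categorize_age(age):
--     """Create a function to categorize an age."""
--     idx = bisect.bisect_right(_STARTS, age) - 1
--     if idx >= 0 and _STARTS[idx] <= age <= _ENDS[idx]:
--         return idx
--     return None
-- ===== Notes on version B (the rewrite author's own statement) =====
-- stated objective: alternative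
-- what changed: Replaced the linear scan over 'start-end' strings (split and int-parsed on every call) by a binary search (bisect_right) over precomputed integer start/end lists, keeping both bound checks so gap and out-of-range ages still return None.
import Mathlib
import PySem

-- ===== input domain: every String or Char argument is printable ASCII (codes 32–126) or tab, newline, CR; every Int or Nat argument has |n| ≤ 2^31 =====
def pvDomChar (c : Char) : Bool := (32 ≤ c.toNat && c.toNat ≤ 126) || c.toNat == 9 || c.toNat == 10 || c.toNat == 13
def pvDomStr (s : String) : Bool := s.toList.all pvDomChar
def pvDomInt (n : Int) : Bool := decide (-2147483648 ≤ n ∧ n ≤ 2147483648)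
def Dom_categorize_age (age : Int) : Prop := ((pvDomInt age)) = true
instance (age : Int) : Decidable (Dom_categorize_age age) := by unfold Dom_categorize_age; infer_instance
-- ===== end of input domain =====

-- B replaces A's linear scan over "start-end" strings (re-parsed with int() on every call)
-- by a binary search over precomputed integer bound lists; objective: alternative/idiomatic.

-- ===== PORT A =====
-- A's module-level literals
def pvRanges : List String := ["1-3", "4-7", "8-12", "13-19", "20-35", "36-55", "56-75", "76-116"]
def pvLabels : List Int := [0, 1, 2, 3, 4, 5, 6, 7]

-- the 'for i, age_range in enumerate(new_ranges)' loop, step for step: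
-- split the range string on '-', int() both pieces, test start <= age <= end, return new_labels[i]
-- (the .getD defaults are unreachable on A's literal range strings, which all split and parse)
def categorize_age_loop (age : Int) : List String → Nat → Option Int
  | [], _ => none
  | r :: rest, i =>
    let parts := (PySem.Str.split? r "-").getD []
    let start := (PySem.Int.ofStr? (parts.getD 0 "")).getD 0
    let stop := (PySem.Int.ofStr? (parts.getD 1 "")).getD 0
    if start ≤ age ∧ age ≤ stop then PySem.List.pyGet? pvLabels (i : Int)
    else categorize_age_loop age rest (i + 1)

def categorize_age (age : Int) : Option Int := categorize_age_loop age pvRanges 0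

-- ===== PORT B =====
-- B's module-level constants
def pvStarts : List Int := [1, 4, 8, 13, 20, 36, 56, 76]
def pvEnds : List Int := [3, 7, 12, 19, 35, 55, 75, 116]

-- idx = bisect.bisect_right(_STARTS, age) - 1; if idx >= 0 and _STARTS[idx] <= age <= _ENDS[idx]: return idx
def categorize_age_alt (age : Int) : Option Int :=
  let idx : Int := (PySem.List.bisectRight pvStarts age : Int) - 1
  if 0 ≤ idx ∧ PySem.List.pyGetD pvStarts idx 0 ≤ age ∧ age ≤ PySem.List.pyGetD pvEnds idx 0 then
    some idx
  else none

-- ===== PRECONDITION & SPEC =====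
def Spec_categorize_age (age : Int) (out : Option Int) : Prop := out = categorize_age_alt age
instance (age : Int) (out : Option Int) : Decidable (Spec_categorize_age age out) := by unfold Spec_categorize_age; infer_instance

-- ===== CLAIM (what is proved, stated in full; the proofs are below) =====
def Claim_equal_categorize_age : Prop := ∀ (age : Int), Dom_categorize_age age → Spec_categorize_age age (categorize_age age)

-- ===== LEMMAS AND PROOFS =====

-- the common closed characterization both ports are proved equal to
def pvChain (age : Int) : Option Int :=
  if 1 ≤ age ∧ age ≤ 3 then some 0
  else if 4 ≤ age ∧ age ≤ 7 then some 1
  else if 8 ≤ age ∧ age ≤ 12 then some 2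
  else if 13 ≤ age ∧ age ≤ 19 then some 3
  else if 20 ≤ age ∧ age ≤ 35 then some 4
  else if 36 ≤ age ∧ age ≤ 55 then some 5
  else if 56 ≤ age ∧ age ≤ 75 then some 6
  else if 76 ≤ age ∧ age ≤ 116 then some 7
  else none

-- one step of A's loop, with the parsed bounds supplied as literals (discharged by decide)
lemma pb (r : String) (a b : Int)
    (ha : (PySem.Int.ofStr? ((((PySem.Str.split? r "-").getD []).getD 0 ""))).getD 0 = a)
    (hb : (PySem.Int.ofStr? ((((PySem.Str.split? r "-").getD []).getD 1 ""))).getD 0 = b)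
    (age : Int) (rest : List String) (i : Nat) :
    categorize_age_loop age (r :: rest) i =
      if a ≤ age ∧ age ≤ b then PySem.List.pyGet? pvLabels (i : Int)
      else categorize_age_loop age rest (i + 1) := by
  simp only [categorize_age_loop]
  rw [ha, hb]

set_option maxHeartbeats 1000000 in
lemma a_eq_chain (age : Int) : categorize_age age = pvChain age := by
  unfold categorize_age pvRanges
  rw [pb _ 1 3 (by decide) (by decide),
      pb _ 4 7 (by decide) (by decide),
      pb _ 8 12 (by decide) (by decide),
      pb _ 13 19 (by decide) (by decide),
      pb _ 20 35 (by decide) (by decide),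
      pb _ 36 55 (by decide) (by decide),
      pb _ 56 75 (by decide) (by decide),
      pb _ 76 116 (by decide) (by decide)]
  simp only [categorize_age_loop, pvChain, PySem.List.pyGet?, PySem.List.pyIdx?, pvLabels]
  norm_num
  split_ifs <;> rfl

set_option maxHeartbeats 1000000 in
lemma b_eq_chain (age : Int) : categorize_age_alt age = pvChain age := by
  obtain ⟨hk8, h1, h2⟩ := PySem.List.bisectRight_spec pvStarts age (by decide)
  unfold categorize_age_alt pvChain
  set k := PySem.List.bisectRight pvStarts age with hk
  simp only [pvStarts, List.length_cons, List.length_nil] at hk8 h1 h2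
  interval_cases k
  · have hhi := h2 0 (by norm_num) (by norm_num)
    norm_num [pvStarts] at hhi
    norm_num
    split_ifs <;> first | rfl | omega
  · have hlo := h1 0 (by norm_num) (by norm_num)
    have hhi := h2 1 (by norm_num) (by norm_num)
    norm_num [pvStarts] at hlo hhi
    norm_num [show PySem.List.pyGetD pvStarts 0 0 = 1 from by decide,
              show PySem.List.pyGetD pvEnds 0 0 = 3 from by decide]
    split_ifs <;> first | rfl | omega
  · have hlo := h1 1 (by norm_num) (by norm_num)
    have hhi := h2 2 (by norm_num) (by norm_num)
    norm_num [pvStarts] at hlo hhi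
    norm_num [show PySem.List.pyGetD pvStarts 1 0 = 4 from by decide,
              show PySem.List.pyGetD pvEnds 1 0 = 7 from by decide]
    split_ifs <;> first | rfl | omega
  · have hlo := h1 2 (by norm_num) (by norm_num)
    have hhi := h2 3 (by norm_num) (by norm_num)
    norm_num [pvStarts] at hlo hhi
    norm_num [show PySem.List.pyGetD pvStarts 2 0 = 8 from by decide,
              show PySem.List.pyGetD pvEnds 2 0 = 12 from by decide]
    split_ifs <;> first | rfl | omega
  · have hlo := h1 3 (by norm_num) (by norm_num)
    have hhi := h2 4 (by norm_num) (by norm_num)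
    norm_num [pvStarts] at hlo hhi
    norm_num [show PySem.List.pyGetD pvStarts 3 0 = 13 from by decide,
              show PySem.List.pyGetD pvEnds 3 0 = 19 from by decide]
    split_ifs <;> first | rfl | omega
  · have hlo := h1 4 (by norm_num) (by norm_num)
    have hhi := h2 5 (by norm_num) (by norm_num)
    norm_num [pvStarts] at hlo hhi
    norm_num [show PySem.List.pyGetD pvStarts 4 0 = 20 from by decide,
              show PySem.List.pyGetD pvEnds 4 0 = 35 from by decide]
    split_ifs <;> first | rfl | omega
  · have hlo := h1 5 (by norm_num) (by norm_num)
    have hhi := h2 6 (by norm_num) (by norm_num)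
    norm_num [pvStarts] at hlo hhi
    norm_num [show PySem.List.pyGetD pvStarts 5 0 = 36 from by decide,
              show PySem.List.pyGetD pvEnds 5 0 = 55 from by decide]
    split_ifs <;> first | rfl | omega
  · have hlo := h1 6 (by norm_num) (by norm_num)
    have hhi := h2 7 (by norm_num) (by norm_num)
    norm_num [pvStarts] at hlo hhi
    norm_num [show PySem.List.pyGetD pvStarts 6 0 = 56 from by decide,
              show PySem.List.pyGetD pvEnds 6 0 = 75 from by decide]
    split_ifs <;> first | rfl | omega
  · have hlo := h1 7 (by norm_num) (by norm_num)
    norm_num [pvStarts] at hlo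
    norm_num [show PySem.List.pyGetD pvStarts 7 0 = 76 from by decide,
              show PySem.List.pyGetD pvEnds 7 0 = 116 from by decide]
    split_ifs <;> first | rfl | omega

-- ===== VERDICT (by name: the statement is the Claim_ definition above) =====
theorem categorize_age_spec : Claim_equal_categorize_age := by
  intro age _
  unfold Spec_categorize_age
  rw [a_eq_chain, b_eq_chain]
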